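-- pv_equiv track=rewrite | github.com/eiofmv/data_structures_and_algorithms | 6. Genome Assembly/week3/optimal_k_mer.py | is_k_optimal
-- ===== SOURCE A (Python) =====
-- def is_k_optimal(k, reads):
--     kmers = set()
--     for cur_read in reads:
--         for i in range(0, len(cur_read) - k + 1):
--             kmers.add(cur_read[i:i + k])
--
--     prefixes = set()
--     suffixes = set()
--
--     for cur_kmer in kmers:
--         prefixes.add(cur_kmer[:-1])
--         suffixes.add(cur_kmer[1:])
--
--     return prefixes == suffixes
-- ===== SOURCE B (Python) =====
-- def is_k_optimal(k, reads):
--     # One pass over every window: one dict maps each (k-1)-mer to a bitmask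
--     # (1 = seen as a k-mer prefix, 2 = seen as a k-mer suffix); no k-mer set,
--     # no separate prefix/suffix sets are built.
--     flags = {}
--     for cur_read in reads:
--         for i in range(0, len(cur_read) - k + 1):
--             km = cur_read[i:i + k]
--             p = km[:-1]
--             s = km[1:]
--             flags[p] = flags.get(p, 0) | 1
--             flags[s] = flags.get(s, 0) | 2
--     return all(v == 3 for v in flags.values())
-- ===== Notes on version B (the rewrite author's own statement) =====
-- stated objective: alternative
-- what changed: Replaces the k-mer set plus two separate prefix/suffix sets and a set-equality test with a single pass over the windows recording, in one dict, a bitmask per (k-1)-mer (1 = seen as prefix, 2 = seen as suffix) and checking all masks equal 3.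
import Mathlib
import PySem

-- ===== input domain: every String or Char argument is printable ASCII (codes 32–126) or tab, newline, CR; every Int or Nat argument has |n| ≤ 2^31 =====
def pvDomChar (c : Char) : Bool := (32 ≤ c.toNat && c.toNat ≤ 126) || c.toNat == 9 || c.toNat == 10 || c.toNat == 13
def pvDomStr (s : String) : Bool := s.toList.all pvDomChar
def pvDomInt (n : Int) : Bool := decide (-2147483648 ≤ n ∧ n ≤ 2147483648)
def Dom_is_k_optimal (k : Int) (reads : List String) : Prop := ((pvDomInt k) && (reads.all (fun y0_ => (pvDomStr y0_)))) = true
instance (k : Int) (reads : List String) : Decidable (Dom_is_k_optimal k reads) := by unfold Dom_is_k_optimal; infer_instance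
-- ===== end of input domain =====

-- B replaces A's k-mer set and the two prefix/suffix sets compared for equality by ONE
-- single-pass dict of per-(k-1)-mer bitmasks, checked with all(v == 3); return values are identical.

-- ===== PORT A =====
def is_k_optimal (k : Int) (reads : List String) : Bool :=
  let kmers : PySem.Set String := reads.foldl (fun km r =>
    (PySem.List.pyRange 0 (PySem.Str.len r - k + 1) 1).foldl
      (fun km i => PySem.Set.add km (PySem.Str.slice r (some i) (some (i + k)))) km)
    PySem.Set.empty
  let ps := kmers.foldl (fun acc c =>
      (PySem.Set.add acc.1 (PySem.Str.slice c none (some (-1))),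
       PySem.Set.add acc.2 (PySem.Str.slice c (some 1) none)))
    (PySem.Set.empty, PySem.Set.empty)
  PySem.Set.equal ps.1 ps.2

-- ===== PORT B =====
def is_k_optimal_alt (k : Int) (reads : List String) : Bool :=
  let flags : PySem.Dict String Int := reads.foldl (fun d r =>
    (PySem.List.pyRange 0 (PySem.Str.len r - k + 1) 1).foldl (fun d i =>
      let km := PySem.Str.slice r (some i) (some (i + k))
      let p := PySem.Str.slice km none (some (-1))
      let s := PySem.Str.slice km (some 1) none
      let d := d.insert p (PySem.Int.bor (d.getD p 0) 1)
      d.insert s (PySem.Int.bor (d.getD s 0) 2)) d)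
    PySem.Dict.empty
  flags.values.all (fun v => v == 3)

-- ===== PRECONDITION & SPEC =====
def Spec_is_k_optimal (k : Int) (reads : List String) (out : Bool) : Prop := out = is_k_optimal_alt k reads
instance (k : Int) (reads : List String) (out : Bool) : Decidable (Spec_is_k_optimal k reads out) := by unfold Spec_is_k_optimal; infer_instance

-- ===== CLAIM (what is proved, stated in full; the proofs are below) =====
def Claim_equal_is_k_optimal : Prop := ∀ (k : Int) (reads : List String), Dom_is_k_optimal k reads → Spec_is_k_optimal k reads (is_k_optimal k reads)

-- ===== LEMMAS AND PROOFS =====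

-- the (k-1)-prefix and (k-1)-suffix of a k-mer (shared slice expressions of both ports)
def preF (x : String) : String := PySem.Str.slice x none (some (-1))
def sufF (x : String) : String := PySem.Str.slice x (some 1) none
-- the list of all windows of all reads, in traversal order (with duplicates)
def windows (k : Int) (r : String) : List String :=
  (PySem.List.pyRange 0 (PySem.Str.len r - k + 1) 1).map
    (fun i => PySem.Str.slice r (some i) (some (i + k)))
def allW (k : Int) (reads : List String) : List String := reads.flatMap (windows k)

-- both ports' nested read/range loops are one fold over the window list
theorem foldl_nested {α : Type} (k : Int) (reads : List String) (step : α → String → α) (init : α) :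
    reads.foldl (fun a r =>
      (PySem.List.pyRange 0 (PySem.Str.len r - k + 1) 1).foldl
        (fun a i => step a (PySem.Str.slice r (some i) (some (i + k)))) a) init
    = (allW k reads).foldl step init := by
  induction reads generalizing init with
  | nil => rfl
  | cons r rs ih =>
    simp only [List.foldl_cons, allW, List.flatMap_cons, List.foldl_append]
    rw [ih]
    congr 1
    rw [windows, List.foldl_map]

-- B's per-window dict update
def stepB (d : PySem.Dict String Int) (w : String) : PySem.Dict String Int :=
  (d.insert (preF w) (PySem.Int.bor (d.getD (preF w) 0) 1)).insert (sufF w)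
    (PySem.Int.bor ((d.insert (preF w) (PySem.Int.bor (d.getD (preF w) 0) 1)).getD (sufF w) 0) 2)

def mask (W : List String) (x : String) : Int :=
  (if x ∈ W.map preF then 1 else 0) + (if x ∈ W.map sufF then 2 else 0)

-- characterization of B's dict after processing the window list W
set_option maxHeartbeats 2000000 in
theorem flags_spec (W : List String) :
    (W.foldl stepB PySem.Dict.empty).keys.Nodup ∧
    (∀ x : String, (W.foldl stepB PySem.Dict.empty).contains x
        = decide (x ∈ W.map preF ∨ x ∈ W.map sufF)) ∧
    (∀ x : String, (W.foldl stepB PySem.Dict.empty).getD x 0 = mask W x) := by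
  induction W using List.reverseRecOn with
  | nil =>
    refine ⟨by simp [PySem.Dict.keys_empty], fun x => by simp [PySem.Dict.contains_empty], fun x => ?_⟩
    simp [PySem.Dict.getD_empty, mask]
  | append_singleton W w ih =>
    obtain ⟨hnd, hcon, hget⟩ := ih
    rw [List.foldl_append]
    simp only [List.foldl_cons, List.foldl_nil]
    set d := W.foldl stepB PySem.Dict.empty with hd
    refine ⟨?_, ?_, ?_⟩
    · exact PySem.Dict.nodup_keys_insert _ _ _ (PySem.Dict.nodup_keys_insert _ _ _ hnd)
    · intro x
      simp only [stepB, PySem.Dict.contains_insert, hcon x, List.map_append, List.mem_append,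
        List.map_cons, List.map_nil, List.mem_cons]
      by_cases h1 : x = sufF w <;> by_cases h2 : x = preF w <;>
        by_cases h3 : x ∈ W.map preF <;> by_cases h4 : x ∈ W.map sufF <;>
        simp [h1, h2, h3, h4]
    · intro x
      simp only [stepB, PySem.Dict.getD_insert, hget, mask, List.map_append, List.mem_append,
        List.map_cons, List.map_nil, List.mem_cons, List.not_mem_nil, or_false]
      split_ifs <;> simp_all <;> first | decide | tauto

theorem alt_iff (k : Int) (reads : List String) :
    is_k_optimal_alt k reads = true ↔
      (∀ x : String, x ∈ (allW k reads).map preF ∨ x ∈ (allW k reads).map sufF →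
        x ∈ (allW k reads).map preF ∧ x ∈ (allW k reads).map sufF) := by
  have hB : is_k_optimal_alt k reads
      = ((allW k reads).foldl stepB PySem.Dict.empty).values.all (fun v => v == 3) := by
    show (reads.foldl (fun d r =>
        (PySem.List.pyRange 0 (PySem.Str.len r - k + 1) 1).foldl
          (fun d i => stepB d (PySem.Str.slice r (some i) (some (i + k)))) d)
        PySem.Dict.empty).values.all (fun v => v == 3) = _
    rw [foldl_nested k reads stepB PySem.Dict.empty]
  rw [hB]
  obtain ⟨hnd, hcon, hget⟩ := flags_spec (allW k reads)
  rw [PySem.Dict.values_eq_map_keys _ hnd 0, List.all_map, List.all_eq_true]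
  constructor
  · intro h x hx
    have hk : x ∈ ((allW k reads).foldl stepB PySem.Dict.empty).keys := by
      rw [← PySem.Dict.contains_iff_mem_keys, hcon x]
      simpa using hx
    have := h x hk
    simp only [Function.comp, beq_iff_eq] at this
    rw [hget x, mask] at this
    by_cases h3 : x ∈ (allW k reads).map preF <;> by_cases h4 : x ∈ (allW k reads).map sufF <;>
      simp [h3, h4] at this ⊢
  · intro h x hk
    have hx : x ∈ (allW k reads).map preF ∨ x ∈ (allW k reads).map sufF := by
      have := (PySem.Dict.contains_iff_mem_keys _ _).mpr hk
      rw [hcon x] at this; simpa using this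
    obtain ⟨h3, h4⟩ := h x hx
    simp only [Function.comp, beq_iff_eq, hget x, mask, h3, h4, if_pos]
    decide

theorem a_iff (k : Int) (reads : List String) :
    is_k_optimal k reads = true ↔
      (∀ x : String, x ∈ (allW k reads).map preF ↔ x ∈ (allW k reads).map sufF) := by
  have hA : is_k_optimal k reads
      = PySem.Set.equal
          (((allW k reads).foldl PySem.Set.add PySem.Set.empty).foldl
            (fun acc c => (PySem.Set.add acc.1 (preF c), PySem.Set.add acc.2 (sufF c)))
            (PySem.Set.empty, PySem.Set.empty)).1
          (((allW k reads).foldl PySem.Set.add PySem.Set.empty).foldl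
            (fun acc c => (PySem.Set.add acc.1 (preF c), PySem.Set.add acc.2 (sufF c)))
            (PySem.Set.empty, PySem.Set.empty)).2 := by
    show PySem.Set.equal
        ((((reads.foldl (fun km r =>
            (PySem.List.pyRange 0 (PySem.Str.len r - k + 1) 1).foldl
              (fun km i => PySem.Set.add km (PySem.Str.slice r (some i) (some (i + k)))) km)
            PySem.Set.empty)).foldl
          (fun acc c => (PySem.Set.add acc.1 (preF c), PySem.Set.add acc.2 (sufF c)))
          (PySem.Set.empty, PySem.Set.empty)).1)
        ((((reads.foldl (fun km r =>
            (PySem.List.pyRange 0 (PySem.Str.len r - k + 1) 1).foldl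
              (fun km i => PySem.Set.add km (PySem.Str.slice r (some i) (some (i + k)))) km)
            PySem.Set.empty)).foldl
          (fun acc c => (PySem.Set.add acc.1 (preF c), PySem.Set.add acc.2 (sufF c)))
          (PySem.Set.empty, PySem.Set.empty)).2) = _
    rw [foldl_nested k reads PySem.Set.add PySem.Set.empty]
  rw [hA]
  rw [PySem.List.foldl_prod_mk (f := fun p c => PySem.Set.add p (preF c))
        (g := fun s c => PySem.Set.add s (sufF c))]
  have hK : (allW k reads).foldl PySem.Set.add PySem.Set.empty = PySem.Set.ofList (allW k reads) :=
    (PySem.Set.ofList_eq_foldl _).symm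
  have hof : ∀ (f : String → String) (l : List String),
      l.foldl (fun p c => PySem.Set.add p (f c)) PySem.Set.empty = PySem.Set.ofList (l.map f) := by
    intro f l
    rw [PySem.Set.ofList_eq_foldl, List.foldl_map]
    rfl
  rw [hK, hof preF, hof sufF, PySem.Set.equal_iff]
  simp only [PySem.Set.mem_ofList, List.mem_map]

-- ===== VERDICT (by name: the statement is the Claim_ definition above) =====
theorem is_k_optimal_spec : Claim_equal_is_k_optimal := by
  intro k reads _
  unfold Spec_is_k_optimal
  have ha := a_iff k reads
  have hb := alt_iff k reads
  have hiff : is_k_optimal k reads = true ↔ is_k_optimal_alt k reads = true := by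
    rw [ha, hb]
    constructor
    · intro h x hx
      rcases hx with h1 | h2
      · exact ⟨h1, (h x).mp h1⟩
      · exact ⟨(h x).mpr h2, h2⟩
    · intro h x
      constructor
      · intro h1; exact (h x (Or.inl h1)).2
      · intro h2; exact (h x (Or.inr h2)).1
  cases hA : is_k_optimal k reads <;> cases hB : is_k_optimal_alt k reads <;> simp_all
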